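-- pv_equiv track=rewrite | github.com/ryqm/SovCal-GUI | CalSov-GUI.py | get_season
-- ===== SOURCE A (Python) =====
-- months = [
--     ("Attinia", 42),
--     ("Havenox", 41),
--     ("Iorvia", 42),
--     ("Victoria", 41),
--     ("Protopia", 42),
--     ("Gioia", 41),
--     ("Wulfrum", 42),
--     ("Tuxia", 43),
--     ("Chimpe", 41),
--     ("Ratatosqua", 42),
--     ("Odinia", 39),
--     ("Neo", 42),
-- ]
--
-- def get_world_day_of_year(month_name, day_in_month):
--     total_days = 0
--     for name, days_in_month in months:
--         if name == month_name:
--             total_days += day_in_month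
--             return total_days
--         else:
--             total_days += days_in_month
--     raise ValueError(f"Invalid month name: {month_name}")
--
-- season_starts = {
--     "Spring": ("Iorvia", 4),
--     "Summer": ("Gioia", 4),
--     "Fall": ("Chimpe", 3),
--     "Winter": ("Neo", 4),
-- }
--
-- def get_season(world_day_of_year):
--     season_days = []
--     for season, (month_name, day_in_month) in season_starts.items():
--         day_of_year = get_world_day_of_year(month_name, day_in_month)
--         season_days.append((day_of_year, season))
--     season_days.sort()
--     for i in range(len(season_days)):
--         if world_day_of_year < season_days[i][0]:
--             return season_days[i - 1][1] if i > 0 else season_days[-1][1]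
--     return season_days[-1][1]
-- ===== SOURCE B (Python) =====
-- import bisect
--
-- # Season boundaries (world day-of-year at which each season begins), sorted,
-- # and the cyclic season order: before day 87 it is still Winter of the old year.
-- _BOUNDARIES = [87, 212, 337, 460]
-- _SEASONS = ["Winter", "Spring", "Summer", "Fall"]
--
-- def get_season(world_day_of_year):
--     idx = bisect.bisect_right(_BOUNDARIES, world_day_of_year)
--     return _SEASONS[idx % 4]
-- ===== Notes on version B (the rewrite author's own statement) =====
-- stated objective: simpler
-- what changed: Replaces rebuilding the boundary list from the month table, sorting it and linearly scanning with wrap-around index arithmetic by a binary search (bisect_right) over the precomputed constant boundary list [87,212,337,460] and a cyclic lookup into the season list.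
import Mathlib
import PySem

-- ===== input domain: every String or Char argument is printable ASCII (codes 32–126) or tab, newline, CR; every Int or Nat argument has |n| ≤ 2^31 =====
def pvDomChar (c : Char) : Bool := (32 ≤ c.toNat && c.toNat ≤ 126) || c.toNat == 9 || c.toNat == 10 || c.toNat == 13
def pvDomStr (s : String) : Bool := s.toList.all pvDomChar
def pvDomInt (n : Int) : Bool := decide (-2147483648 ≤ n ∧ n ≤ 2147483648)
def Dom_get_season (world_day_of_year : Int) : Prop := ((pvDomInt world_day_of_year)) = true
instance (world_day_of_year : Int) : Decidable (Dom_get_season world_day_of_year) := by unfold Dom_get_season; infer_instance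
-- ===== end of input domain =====

-- B replaces the build-sort-scan over the month/season tables by a bisect_right
-- on the precomputed constant boundary list with a cyclic season lookup (simpler).

-- ===== PORT A =====
def months : List (String × Int) :=
  [("Attinia", 42), ("Havenox", 41), ("Iorvia", 42), ("Victoria", 41),
   ("Protopia", 42), ("Gioia", 41), ("Wulfrum", 42), ("Tuxia", 43),
   ("Chimpe", 41), ("Ratatosqua", 42), ("Odinia", 39), ("Neo", 42)]

-- loop of get_world_day_of_year; none = the ValueError branch
def gwdoyGo (month_name : String) (day_in_month : Int) :
    List (String × Int) → Int → Option Int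
  | [], _ => none
  | (name, days_in_month) :: rest, total_days =>
    if name == month_name then some (total_days + day_in_month)
    else gwdoyGo month_name day_in_month rest (total_days + days_in_month)

def get_world_day_of_year (month_name : String) (day_in_month : Int) : Option Int :=
  gwdoyGo month_name day_in_month months 0

-- dict in insertion order = its items list
def season_starts : List (String × (String × Int)) :=
  [("Spring", ("Iorvia", 4)), ("Summer", ("Gioia", 4)),
   ("Fall", ("Chimpe", 3)), ("Winter", ("Neo", 4))]

-- the 'for i in range(len(season_days))' scan; pyGet? is never none for i drawn
-- from range(len sd), so the .getD "" defaults are unreachable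
def aScanGo (d : Int) (sd : List (Int × String)) : List Int → String
  | [] => ((PySem.List.pyGet? sd (-1)).map Prod.snd).getD ""
  | i :: rest =>
    match PySem.List.pyGet? sd i with
    | some p =>
      if d < p.1 then
        (if i > 0 then ((PySem.List.pyGet? sd (i - 1)).map Prod.snd).getD ""
         else ((PySem.List.pyGet? sd (-1)).map Prod.snd).getD "")
      else aScanGo d sd rest
    | none => ""

def get_season (world_day_of_year : Int) : String :=
  -- get_world_day_of_year always succeeds on season_starts' months, so .getD 0 is unreachable
  let season_days : List (Int × String) :=
    season_starts.foldl
      (fun acc p => acc ++ [((get_world_day_of_year p.2.1 p.2.2).getD 0, p.1)]) []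
  -- Python sorts the (int, str) tuples; the day components are distinct, so
  -- sorting by the day alone is the same order
  let sd := PySem.List.sorted season_days (fun p => p.1) false
  aScanGo world_day_of_year sd (PySem.List.pyRange 0 sd.length 1)

-- ===== PORT B =====
def bBoundaries : List Int := [87, 212, 337, 460]
def bSeasons : List String := ["Winter", "Spring", "Summer", "Fall"]

def get_season_alt (world_day_of_year : Int) : String :=
  let idx := PySem.List.bisectRight bBoundaries world_day_of_year
  bSeasons.getD (idx % 4) ""

-- ===== PRECONDITION & SPEC =====
def Spec_get_season (world_day_of_year : Int) (out : String) : Prop := out = get_season_alt world_day_of_year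
instance (world_day_of_year : Int) (out : String) : Decidable (Spec_get_season world_day_of_year out) := by unfold Spec_get_season; infer_instance

-- ===== CLAIM (what is proved, stated in full; the proofs are below) =====
def Claim_equal_get_season : Prop := ∀ (world_day_of_year : Int), Dom_get_season world_day_of_year → Spec_get_season world_day_of_year (get_season world_day_of_year)

-- ===== LEMMAS AND PROOFS =====

lemma season_days_eval :
    PySem.List.sorted
      (season_starts.foldl
        (fun acc p => acc ++ [((get_world_day_of_year p.2.1 p.2.2).getD 0, p.1)]) [])
      (fun p => p.1) false
      = [(87, "Spring"), (212, "Summer"), (337, "Fall"), (460, "Winter")] := by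
  decide

lemma range4_eval : PySem.List.pyRange 0 4 1 = [0, 1, 2, 3] := by decide

lemma scan_lt87 (d : Int) (h : d < 87) :
    aScanGo d [(87, "Spring"), (212, "Summer"), (337, "Fall"), (460, "Winter")]
      (PySem.List.pyRange 0 4 1) = "Winter" := by
  rw [range4_eval]
  simp [aScanGo, PySem.List.pyGet?, PySem.List.pyIdx?, h]

lemma scan_spring (d : Int) (h1 : ¬ d < 87) (h2 : d < 212) :
    aScanGo d [(87, "Spring"), (212, "Summer"), (337, "Fall"), (460, "Winter")]
      (PySem.List.pyRange 0 4 1) = "Spring" := by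
  rw [range4_eval]
  simp [aScanGo, PySem.List.pyGet?, PySem.List.pyIdx?, h1, h2]

lemma scan_summer (d : Int) (h1 : ¬ d < 212) (h2 : d < 337) :
    aScanGo d [(87, "Spring"), (212, "Summer"), (337, "Fall"), (460, "Winter")]
      (PySem.List.pyRange 0 4 1) = "Summer" := by
  rw [range4_eval]
  have h0 : ¬ d < 87 := by omega
  simp [aScanGo, PySem.List.pyGet?, PySem.List.pyIdx?, h0, h1, h2]

lemma scan_fall (d : Int) (h1 : ¬ d < 337) (h2 : d < 460) :
    aScanGo d [(87, "Spring"), (212, "Summer"), (337, "Fall"), (460, "Winter")]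
      (PySem.List.pyRange 0 4 1) = "Fall" := by
  rw [range4_eval]
  have h0 : ¬ d < 87 := by omega
  have h0' : ¬ d < 212 := by omega
  simp [aScanGo, PySem.List.pyGet?, PySem.List.pyIdx?, h0, h0', h1, h2]

lemma scan_ge460 (d : Int) (h : ¬ d < 460) :
    aScanGo d [(87, "Spring"), (212, "Summer"), (337, "Fall"), (460, "Winter")]
      (PySem.List.pyRange 0 4 1) = "Winter" := by
  rw [range4_eval]
  have h0 : ¬ d < 87 := by omega
  have h0' : ¬ d < 212 := by omega
  have h0'' : ¬ d < 337 := by omega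
  simp [aScanGo, PySem.List.pyGet?, PySem.List.pyIdx?, h0, h0', h0'', h]

-- ===== VERDICT (by name: the statement is the Claim_ definition above) =====
theorem get_season_spec : Claim_equal_get_season := by
  intro d _
  unfold Spec_get_season get_season get_season_alt
  simp only [season_days_eval, bBoundaries, bSeasons, List.length_cons, List.length_nil]
  norm_num
  obtain ⟨hle, hlo, hhi⟩ := PySem.List.bisectRight_spec [87, 212, 337, 460] d (by decide)
  norm_num at hle hlo hhi
  set k := PySem.List.bisectRight [87, 212, 337, 460] d with hk
  interval_cases k
  · have hb := hhi 0 (by norm_num) (by omega); norm_num at hb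
    rw [scan_lt87 d hb]; rfl
  · have ha := hlo 0 (by norm_num) (by omega); have hb := hhi 1 (by norm_num) (by omega)
    norm_num at ha hb
    rw [scan_spring d (by omega) (by omega)]; rfl
  · have ha := hlo 1 (by norm_num) (by omega); have hb := hhi 2 (by norm_num) (by omega)
    norm_num at ha hb
    rw [scan_summer d (by omega) (by omega)]; rfl
  · have ha := hlo 2 (by norm_num) (by omega); have hb := hhi 3 (by norm_num) (by omega)
    norm_num at ha hb
    rw [scan_fall d (by omega) (by omega)]; rfl
  · have ha := hlo 3 (by norm_num) (by omega)
    norm_num at ha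
    rw [scan_ge460 d (by omega)]; rfl
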